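-- pv_equiv track=rewrite | github.com/Aman-CV/Netplay-VideoAnalytics | data_preparation/video_labelling.py | add_classes
-- ===== SOURCE A (Python) =====
-- def add_classes(frame_ip_):
--     frame_inputs = frame_ip_.copy()
--     start_class = "null"
--     change_ = True
--
--     for i in range(len(frame_inputs)):
--         if (start_class =='b' and frame_inputs[i] == 'a') or (start_class == 'a' and frame_inputs[i] == 'b'):
--             if change_: change_ = False
--         if frame_inputs[i] == 'a' and change_:
--             start_class = 'a'
--             frame_inputs[i] = 'c'
--         if frame_inputs[i] == 'b' and change_:
--             start_class = 'b'
--             frame_inputs[i] = 'd'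
--
--
--     return frame_inputs
-- ===== SOURCE B (Python) =====
-- def add_classes(frame_ip_):
--     out = list(frame_ip_)
--     start = next((x for x in out if x in ('a', 'b')), None)
--     if start is None:
--         return out
--     opp = 'b' if start == 'a' else 'a'
--     cut = out.index(opp) if opp in out else len(out)
--     relabel = {'a': 'c', 'b': 'd'}
--     for i in range(cut):
--         out[i] = relabel.get(out[i], out[i])
--     return out
-- ===== Notes on version B (the rewrite author's own statement) =====
-- stated objective: simpler
-- what changed: Replaced the sticky-flag state machine (start_class/change_ carried through one loop) with a find-boundary-then-relabel decomposition: locate the start class, find the cut index of the first opposite token, then relabel only the prefix via a dict.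
import Mathlib
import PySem

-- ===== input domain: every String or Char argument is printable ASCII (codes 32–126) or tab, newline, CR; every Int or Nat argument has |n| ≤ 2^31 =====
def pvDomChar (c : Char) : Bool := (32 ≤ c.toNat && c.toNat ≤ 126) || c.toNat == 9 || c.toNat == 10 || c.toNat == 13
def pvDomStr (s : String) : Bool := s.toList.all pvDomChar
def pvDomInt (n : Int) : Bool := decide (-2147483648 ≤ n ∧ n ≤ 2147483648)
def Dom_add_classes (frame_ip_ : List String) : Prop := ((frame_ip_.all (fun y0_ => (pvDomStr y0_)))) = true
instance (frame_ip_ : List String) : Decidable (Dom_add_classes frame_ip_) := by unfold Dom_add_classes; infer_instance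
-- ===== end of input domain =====

-- B replaces A's sticky-flag state machine by a find-boundary-then-relabel-prefix
-- decomposition ('simpler'); same return value, input list is never mutated by either.

-- ===== PORT A =====
-- A's for-loop over indices, carrying start_class and change_; the write to
-- frame_inputs[i] becomes the emitted head (each iteration touches only index i).
def add_classes_loop (l : List String) (start_class : String) (change_ : Bool) : List String :=
  match l with
  | [] => []
  | x :: xs =>
    let change_ := if ((start_class == "b" && x == "a") || (start_class == "a" && x == "b")) && change_
                   then false else change_
    if x == "a" && change_ then "c" :: add_classes_loop xs "a" change_
    else if x == "b" && change_ then "d" :: add_classes_loop xs "b" change_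
    else x :: add_classes_loop xs start_class change_

def add_classes (frame_ip_ : List String) : List String :=
  add_classes_loop frame_ip_ "null" true

-- ===== PORT B =====
-- cut = out.index(opp) if opp in out else len(out)
def add_classes_cut (l : List String) (opp : String) : Nat :=
  match PySem.List.index? l opp with
  | some i => i
  | none => l.length

-- the `for i in range(cut)` loop rewriting out[i] by the dict (identity elsewhere)
def add_classes_relabel (cut : Nat) (l : List String) : List String :=
  match cut, l with
  | 0, l => l
  | _ + 1, [] => []
  | n + 1, x :: xs =>
    (if x == "a" then "c" else if x == "b" then "d" else x) :: add_classes_relabel n xs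

def add_classes_alt (frame_ip_ : List String) : List String :=
  match frame_ip_.find? (fun x => x == "a" || x == "b") with
  | none => frame_ip_
  | some start =>
    add_classes_relabel (add_classes_cut frame_ip_ (if start == "a" then "b" else "a")) frame_ip_

-- ===== PRECONDITION & SPEC =====
def Spec_add_classes (frame_ip_ : List String) (out : List String) : Prop := out = add_classes_alt frame_ip_
instance (frame_ip_ : List String) (out : List String) : Decidable (Spec_add_classes frame_ip_ out) := by unfold Spec_add_classes; infer_instance

-- ===== CLAIM (what is proved, stated in full; the proofs are below) =====
def Claim_equal_add_classes : Prop := ∀ (frame_ip_ : List String), Dom_add_classes frame_ip_ → Spec_add_classes frame_ip_ (add_classes frame_ip_)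

-- ===== LEMMAS AND PROOFS =====

-- once change_ is false the loop rewrites nothing
theorem add_classes_loop_false (l : List String) (sc : String) :
    add_classes_loop l sc false = l := by
  induction l generalizing sc with
  | nil => rfl
  | cons x xs ih => simp [add_classes_loop, ih]

theorem add_classes_cut_cons_self (xs : List String) (opp : String) :
    add_classes_cut (opp :: xs) opp = 0 := by
  unfold add_classes_cut
  rw [PySem.List.index?_cons_self]

theorem add_classes_cut_cons_ne {x opp : String} (xs : List String) (h : x ≠ opp) :
    add_classes_cut (x :: xs) opp = add_classes_cut xs opp + 1 := by
  unfold add_classes_cut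
  rw [PySem.List.index?_cons_of_ne xs h]
  cases PySem.List.index? xs opp <;> simp

-- start class 'a' fixed, change_ still true: A relabels exactly up to the first 'b'
theorem add_classes_loop_started_a (xs : List String) :
    add_classes_loop xs "a" true = add_classes_relabel (add_classes_cut xs "b") xs := by
  induction xs with
  | nil => rfl
  | cons x xs ih =>
    by_cases hxb : x = "b"
    · subst hxb
      rw [add_classes_cut_cons_self]
      simp [add_classes_loop, add_classes_loop_false, add_classes_relabel]
    · rw [add_classes_cut_cons_ne xs hxb]
      by_cases hxa : x = "a"
      · subst hxa
        simp [add_classes_loop, add_classes_relabel, ih]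
      · simp [add_classes_loop, add_classes_relabel, hxa, hxb, ih]

-- symmetric: start class 'b'
theorem add_classes_loop_started_b (xs : List String) :
    add_classes_loop xs "b" true = add_classes_relabel (add_classes_cut xs "a") xs := by
  induction xs with
  | nil => rfl
  | cons x xs ih =>
    by_cases hxa : x = "a"
    · subst hxa
      rw [add_classes_cut_cons_self]
      simp [add_classes_loop, add_classes_loop_false, add_classes_relabel]
    · rw [add_classes_cut_cons_ne xs hxa]
      by_cases hxb : x = "b"
      · subst hxb
        simp [add_classes_loop, add_classes_relabel, ih]
      · simp [add_classes_loop, add_classes_relabel, hxa, hxb, ih]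

-- B passes a head that is neither 'a' nor 'b' through unchanged
theorem add_classes_alt_cons_skip (x : String) (xs : List String)
    (hxa : x ≠ "a") (hxb : x ≠ "b") :
    add_classes_alt (x :: xs) = x :: add_classes_alt xs := by
  have hfind : List.find? (fun y => y == "a" || y == "b") (x :: xs)
      = List.find? (fun y => y == "a" || y == "b") xs :=
    List.find?_cons_of_neg (by simp [hxa, hxb])
  unfold add_classes_alt
  rw [hfind]
  cases hr : List.find? (fun y => y == "a" || y == "b") xs with
  | none => rfl
  | some s =>
    have hs : s = "a" ∨ s = "b" := by
      have := List.find?_some hr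
      simpa using this
    rcases hs with h | h <;> subst h
    · simp [add_classes_cut_cons_ne xs hxb, add_classes_relabel, hxa, hxb]
    · simp [add_classes_cut_cons_ne xs hxa, add_classes_relabel, hxa, hxb]

theorem add_classes_main (l : List String) :
    add_classes_loop l "null" true = add_classes_alt l := by
  induction l with
  | nil => rfl
  | cons x xs ih =>
    by_cases hxa : x = "a"
    · subst hxa
      rw [show add_classes_loop ("a" :: xs) "null" true = "c" :: add_classes_loop xs "a" true
            from by simp [add_classes_loop]]
      rw [add_classes_loop_started_a]
      simp [add_classes_alt, List.find?, add_classes_cut_cons_ne xs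
        (by decide : ("a" : String) ≠ "b"), add_classes_relabel]
    · by_cases hxb : x = "b"
      · subst hxb
        rw [show add_classes_loop ("b" :: xs) "null" true = "d" :: add_classes_loop xs "b" true
              from by simp [add_classes_loop]]
        rw [add_classes_loop_started_b]
        simp [add_classes_alt, List.find?, add_classes_cut_cons_ne xs
          (by decide : ("b" : String) ≠ "a"), add_classes_relabel]
      · rw [show add_classes_loop (x :: xs) "null" true = x :: add_classes_loop xs "null" true
              from by simp [add_classes_loop, hxa, hxb]]
        rw [ih, add_classes_alt_cons_skip x xs hxa hxb]

-- ===== VERDICT (by name: the statement is the Claim_ definition above) =====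
theorem add_classes_spec : Claim_equal_add_classes := by
  intro l _
  unfold Spec_add_classes add_classes
  exact add_classes_main l
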